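-- pv_equiv track=rewrite | github.com/ThunderManatee/advent2022 | day06.py | part1
-- ===== SOURCE A (Python) =====
-- def part1(data):
--     store = []
--     for count, x in enumerate(data):
--         store.append(x)
--         if len(store) < 4:
--             continue
--         elif len(store) == 4 and (len(set(store)) == len(store)):
--             return count+1
--         else:
--             store.pop(0)
-- ===== SOURCE B (Python) =====
-- def part1(data):
--     last = {}
--     start = 0
--     for i, c in enumerate(data):
--         j = last.get(c, -1)
--         if j >= start:
--             start = j + 1
--         last[c] = i
--         if i - start == 3:
--             return i + 1
--     return None
-- ===== Notes on version B (the rewrite author's own statement) =====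
-- stated objective: faster
-- what changed: Replaced A's 4-char list buffer rebuilt with append/pop and a per-window set test by the classic last-occurrence algorithm: a dict of each character's last index plus a sliding window-start pointer, returning i+1 when the window i-start reaches length 4; no per-step set or buffer is built.
import Mathlib
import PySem

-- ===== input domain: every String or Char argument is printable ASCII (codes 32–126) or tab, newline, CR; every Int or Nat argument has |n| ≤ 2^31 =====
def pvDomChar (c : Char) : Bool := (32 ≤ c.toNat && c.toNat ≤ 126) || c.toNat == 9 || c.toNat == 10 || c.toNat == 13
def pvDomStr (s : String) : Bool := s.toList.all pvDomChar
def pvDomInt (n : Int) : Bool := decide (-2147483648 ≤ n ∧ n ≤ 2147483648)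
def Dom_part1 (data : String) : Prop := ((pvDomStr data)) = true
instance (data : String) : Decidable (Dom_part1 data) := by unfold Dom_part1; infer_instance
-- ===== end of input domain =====

-- B replaces A's explicit 4-char buffer + per-window set test by the last-occurrence-dict
-- algorithm (dict of each char's last index + sliding window start); same O(n) cost.

-- ===== PORT A =====
-- the enumerate loop: remaining chars, current index `count`, buffer `store`
def part1Loop : List Char → Int → List Char → Option Int
  | [], _, _ => none
  | x :: xs, count, store =>
    let store' := store ++ [x]                     -- store.append(x)
    if store'.length < 4 then part1Loop xs (count + 1) store'
    else if store'.length = 4 ∧ (PySem.Set.ofList store').length = store'.length then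
      some (count + 1)
    else part1Loop xs (count + 1) store'.tail      -- store.pop(0); store' nonempty, so tail is exact

def part1 (data : String) : Option Int := part1Loop data.toList 0 []

-- ===== PORT B =====
-- the enumerate loop of Source B: remaining chars, index i, dict `last`, window start `start`
def part1AltLoop : List Char → Int → PySem.Dict Char Int → Int → Option Int
  | [], _, _, _ => none
  | c :: cs, i, last, start =>
    let j := last.getD c (-1)                      -- j = last.get(c, -1)
    let start' := if start ≤ j then j + 1 else start
    let last' := last.insert c i                   -- last[c] = i
    if i - start' = 3 then some (i + 1)
    else part1AltLoop cs (i + 1) last' start'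

def part1_alt (data : String) : Option Int :=
  part1AltLoop data.toList 0 PySem.Dict.empty 0

-- ===== PRECONDITION & SPEC =====
def Spec_part1 (data : String) (out : Option Int) : Prop := out = part1_alt data
instance (data : String) (out : Option Int) : Decidable (Spec_part1 data out) := by unfold Spec_part1; infer_instance

-- ===== CLAIM (what is proved, stated in full; the proofs are below) =====
def Claim_equal_part1 : Prop := ∀ (data : String), Dom_part1 data → Spec_part1 data (part1 data)

-- ===== LEMMAS AND PROOFS =====

-- common reference scan: slide a window of 4 down the list, k = index of the window start
def winScan : List Char → Int → Option Int
  | a :: b :: c :: d :: rest, k =>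
    if (PySem.Set.ofList [a, b, c, d]).length = 4 then some (k + 4)
    else winScan (b :: c :: d :: rest) (k + 1)
  | _, _ => none
termination_by cs _ => cs.length
decreasing_by simp

theorem part1Loop_eq_winScan (xs : List Char) : ∀ (count : Int) (p q r : Char),
    part1Loop xs count [p, q, r] = winScan (p :: q :: r :: xs) (count - 3) := by
  induction xs with
  | nil => intro count p q r; simp [part1Loop, winScan]
  | cons x xs ih =>
    intro count p q r
    rw [part1Loop, winScan]
    by_cases h : (PySem.Set.ofList [p, q, r, x]).length = 4
    · simp [h]; omega
    · simp [h, ih]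
      congr 1
      omega

theorem part1_eq_winScan (cs : List Char) : part1Loop cs 0 [] = winScan cs 0 := by
  match cs with
  | [] => simp [part1Loop, winScan]
  | [a] => simp [part1Loop, winScan]
  | [a, b] => simp [part1Loop, winScan]
  | [a, b, c] => simp [part1Loop, winScan]
  | a :: b :: c :: x :: xs =>
    show part1Loop (x :: xs) 3 [a, b, c] = winScan (a :: b :: c :: x :: xs) 0
    rw [part1Loop_eq_winScan]
    norm_num

-- a 4-element window is distinct iff A's set test counts 4
theorem nodup_of_ofList_length {l : List Char} (h : (PySem.Set.ofList l).length = l.length) :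
    l.Nodup := by
  have hperm : List.Perm (PySem.Set.ofList l) l.dedup := by
    rw [List.perm_ext_iff_of_nodup (PySem.Set.nodup_ofList l) (List.nodup_dedup l)]
    intro a; rw [PySem.Set.mem_ofList, List.mem_dedup]
  have hlen : l.dedup.length = l.length := by rw [← hperm.length_eq, h]
  have heq : l.dedup = l := (List.dedup_sublist l).eq_of_length hlen
  rw [← heq]; exact List.nodup_dedup l

theorem ofList_length_of_nodup {l : List Char} (h : l.Nodup) :
    (PySem.Set.ofList l).length = l.length := by
  rw [PySem.Set.ofList_eq_self_of_nodup l h]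

-- last-occurrence index (−1 if absent): the value Source B's dict stores for each char
def lastOcc : List Char → Char → Int
  | [], _ => -1
  | x :: xs, c =>
    let r := lastOcc xs c
    if 0 ≤ r then r + 1 else if x = c then 0 else -1

theorem lastOcc_snoc (done : List Char) (x c : Char) :
    lastOcc (done ++ [x]) c = if c = x then (done.length : Int) else lastOcc done c := by
  induction done with
  | nil =>
    simp only [List.nil_append, lastOcc, List.length_nil]
    rcases eq_or_ne x c with h | h
    · norm_num [h]
    · norm_num [h, Ne.symm h]
  | cons y ys ih =>
    simp only [List.cons_append, lastOcc, ih, List.length_cons]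
    by_cases h : c = x
    · simp [h]
    · simp [h]

theorem lastOcc_ge (done : List Char) (c : Char) : -1 ≤ lastOcc done c := by
  induction done with
  | nil => simp [lastOcc]
  | cons y ys ih => simp only [lastOcc]; split_ifs <;> omega

theorem lastOcc_lt (done : List Char) (c : Char) : lastOcc done c < done.length := by
  induction done with
  | nil => simp [lastOcc]
  | cons y ys ih => simp only [lastOcc, List.length_cons]; split_ifs <;> push_cast <;> omega

theorem lastOcc_le (done : List Char) (c : Char) :
    ∀ (k : Nat), done[k]? = some c → (k : Int) ≤ lastOcc done c := by
  induction done with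
  | nil => intro k hk; simp at hk
  | cons y ys ih =>
    intro k hk
    cases k with
    | zero =>
      simp at hk
      simp only [lastOcc, hk]
      have := lastOcc_ge ys c
      split_ifs <;> omega
    | succ k =>
      simp only [List.getElem?_cons_succ] at hk
      have := ih k hk
      simp only [lastOcc]
      split_ifs <;> push_cast <;> omega

theorem lastOcc_get (done : List Char) (c : Char) (h : 0 ≤ lastOcc done c) :
    done[(lastOcc done c).toNat]? = some c := by
  induction done with
  | nil => simp [lastOcc] at h
  | cons y ys ih =>
    simp only [lastOcc] at h ⊢
    by_cases hr : 0 ≤ lastOcc ys c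
    · have : (lastOcc ys c + 1).toNat = (lastOcc ys c).toNat + 1 := by omega
      simp only [hr, if_pos, this, List.getElem?_cons_succ]
      exact ih hr
    · simp only [hr, if_neg, not_false_iff] at h ⊢
      by_cases hy : y = c
      · simp [hy]
      · simp [hy] at h
theorem not_mem_drop_of_lastOcc_lt (done : List Char) (c : Char) (s : Nat)
    (h : lastOcc done c < (s : Int)) : c ∉ done.drop s := by
  intro hmem
  obtain ⟨k, hk, hget⟩ := List.getElem_of_mem hmem
  have hg : done[s + k]? = some c := by
    rw [← List.getElem?_drop]
    rw [List.getElem?_eq_getElem hk, hget]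
  have := lastOcc_le done c (s + k) hg
  omega

-- two equal chars inside a 4-window make it non-distinct
theorem window_not_nodup {cs : List Char} {t j1 j2 : Nat} {c : Char}
    (h1 : t ≤ j1) (h2 : j1 < j2) (h3 : j2 < t + 4)
    (g1 : cs[j1]? = some c) (g2 : cs[j2]? = some c) :
    ¬ ((cs.drop t).take 4).Nodup := by
  intro hnod
  have e1 : ((cs.drop t).take 4)[j1 - t]? = some c := by
    rw [List.getElem?_take]
    simp only [if_pos (by omega : j1 - t < 4)]
    rw [List.getElem?_drop]
    rwa [Nat.add_sub_cancel' h1]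
  have e2 : ((cs.drop t).take 4)[j2 - t]? = some c := by
    rw [List.getElem?_take]
    simp only [if_pos (by omega : j2 - t < 4)]
    rw [List.getElem?_drop]
    rwa [Nat.add_sub_cancel' (by omega : t ≤ j2)]
  have hlt : j1 - t < ((cs.drop t).take 4).length := by
    by_contra hge
    rw [List.getElem?_eq_none (Nat.le_of_not_lt hge)] at e1
    simp at e1
  have := List.getElem?_inj hlt hnod (e1.trans e2.symm)
  omega

-- winScan returns some (k+s+4) at the least distinct window s
theorem winScan_eq_some : ∀ (s : Nat) (xs : List Char) (k : Int),
    ((xs.drop s).take 4).Nodup → s + 4 ≤ xs.length →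
    (∀ t, t < s → ¬ ((xs.drop t).take 4).Nodup) →
    winScan xs k = some (k + s + 4) := by
  intro s
  induction s with
  | zero =>
    intro xs k hnod hlen _
    match xs, hlen with
    | a :: b :: c :: d :: rest, _ =>
      simp only [List.drop_zero] at hnod
      have h4 : ([a, b, c, d] : List Char).Nodup := by
        have : (a :: b :: c :: d :: rest).take 4 = [a, b, c, d] := rfl
        rw [this] at hnod; exact hnod
      rw [winScan, if_pos (by rw [ofList_length_of_nodup h4]; rfl)]
      norm_num
  | succ s ih =>
    intro xs k hnod hlen hbad
    match xs, hlen with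
    | a :: b :: c :: d :: rest, hlen =>
      have hbad0 := hbad 0 (Nat.succ_pos s)
      simp only [List.drop_zero] at hbad0
      have h4 : ¬ ([a, b, c, d] : List Char).Nodup := by
        have : (a :: b :: c :: d :: rest).take 4 = [a, b, c, d] := rfl
        rw [this] at hbad0; exact hbad0
      rw [winScan, if_neg (fun hc => h4 (nodup_of_ofList_length (by simpa using hc)))]
      have := ih (b :: c :: d :: rest) (k + 1)
        (by simpa using hnod)
        (by simp at hlen ⊢; omega)
        (by intro t ht
            have := hbad (t + 1) (by omega)
            simpa using this)
      rw [this]; congr 1; omega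

-- winScan returns none when every full window has a duplicate
theorem winScan_eq_none : ∀ (n : Nat) (xs : List Char), xs.length ≤ n →
    ∀ (k : Int), (∀ t, t + 4 ≤ xs.length → ¬ ((xs.drop t).take 4).Nodup) →
    winScan xs k = none := by
  intro n
  induction n with
  | zero =>
    intro xs hxs k _
    have hnil : xs = [] := List.eq_nil_of_length_eq_zero (Nat.le_zero.mp hxs)
    subst hnil
    simp [winScan]
  | succ n ih =>
    intro xs hxs k hbad
    rcases xs with _ | ⟨a, xs⟩
    · simp [winScan]
    rcases xs with _ | ⟨b, xs⟩
    · simp [winScan]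
    rcases xs with _ | ⟨c, xs⟩
    · simp [winScan]
    rcases xs with _ | ⟨d, rest⟩
    · simp [winScan]
    · 
      have hbad0 := hbad 0 (by simp)
      simp only [List.drop_zero] at hbad0
      have h4 : ¬ ([a, b, c, d] : List Char).Nodup := by
        have : (a :: b :: c :: d :: rest).take 4 = [a, b, c, d] := rfl
        rw [this] at hbad0; exact hbad0
      rw [winScan, if_neg (fun hc => h4 (nodup_of_ofList_length (by simpa using hc)))]
      apply ih (b :: c :: d :: rest) (by simp at hxs ⊢; omega)
      intro t ht
      have := hbad (t + 1) (by simp at ht ⊢; omega)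
      simpa using this

-- main invariant lemma for B's loop
theorem altLoop_eq (rest : List Char) : ∀ (done : List Char) (last : PySem.Dict Char Int) (s : Nat),
    (∀ c, last.getD c (-1) = lastOcc done c) →
    s ≤ done.length → done.length ≤ s + 3 →
    (done.drop s).Nodup →
    (∀ t, t < s → ¬ (((done ++ rest).drop t).take 4).Nodup) →
    part1AltLoop rest (done.length : Int) last (s : Int) = winScan (done ++ rest) 0 := by
  induction rest with
  | nil =>
    intro done last s hlast hsle hgap hnod hbad
    rw [part1AltLoop]
    symm
    apply winScan_eq_none (done ++ []).length _ le_rfl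
    intro t ht
    simp only [List.append_nil] at ht hbad ⊢
    exact hbad t (by omega)
  | cons x rest' ih =>
    intro done last s hlast hsle hgap hnod hbad
    rw [part1AltLoop]
    simp only [hlast x]
    by_cases hj : (s : Int) ≤ lastOcc done x
    · -- duplicate of x inside the window: start jumps to lastOcc+1
      have hj0 : 0 ≤ lastOcc done x := by omega
      set jn : Nat := (lastOcc done x).toNat with hjn
      have hjx : lastOcc done x = (jn : Int) := by omega
      have hjlt : jn < done.length := by have := lastOcc_lt done x; omega
      have hjs : s ≤ jn := by omega
      rw [if_pos hj]
      rw [if_neg (by omega : ¬ ((done.length : Int) - (lastOcc done x + 1) = 3))]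
      have key := ih (done ++ [x]) (last.insert x (done.length : Int)) (jn + 1)
        (by intro c
            rw [PySem.Dict.getD_insert, lastOcc_snoc]
            split_ifs with h
            · rfl
            · exact hlast c)
        (by simp only [List.length_append, List.length_cons, List.length_nil]; omega)
        (by simp only [List.length_append, List.length_cons, List.length_nil]; omega)
        (by rw [List.drop_append_of_le_length (by omega)]
            have hsub : (done.drop (jn + 1)).Nodup := by
              have : done.drop (jn + 1) = (done.drop s).drop (jn + 1 - s) := by
                rw [List.drop_drop]; congr 1; omega
              rw [this]; exact hnod.sublist (List.drop_sublist _ _)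
            have hx : x ∉ done.drop (jn + 1) :=
              not_mem_drop_of_lastOcc_lt done x (jn + 1) (by omega)
            simpa using List.Nodup.concat hx hsub)
        (by intro t ht
            rw [List.append_assoc]
            simp only [List.singleton_append]
            by_cases hts : t < s
            · exact hbad t hts
            · apply window_not_nodup (c := x) (by omega : t ≤ jn)
                (by omega : jn < done.length) (by omega : done.length < t + 4)
              · rw [List.getElem?_append_left hjlt]
                have := lastOcc_get done x hj0
                rwa [hjx, Int.toNat_natCast] at this
              · rw [List.getElem?_append_right le_rfl]
                simp)
      rw [List.append_assoc, List.singleton_append] at key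
      simp only [List.length_append, List.length_cons, List.length_nil] at key
      push_cast at key
      rw [hjx]
      exact key
    · -- x is fresh in the window: start stays
      have hjlt : lastOcc done x < (s : Int) := by omega
      have hx : x ∉ done.drop s := not_mem_drop_of_lastOcc_lt done x s hjlt
      rw [if_neg hj]
      by_cases hret : (done.length : Int) - s = 3
      · rw [if_pos hret]
        symm
        have hdl : (done.drop s).length = 3 := by simp; omega
        have hwin : ((done ++ x :: rest').drop s).take 4 = done.drop s ++ [x] := by
          rw [List.drop_append_of_le_length (by omega)]
          rw [List.take_append, hdl, List.take_of_length_le (by omega)]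
          rfl
        have := winScan_eq_some s (done ++ x :: rest') 0
          (by rw [hwin]; simpa using List.Nodup.concat hx hnod)
          (by simp only [List.length_append, List.length_cons]; omega)
          (fun t ht => hbad t ht)
        rw [this]; congr 1; omega
      · rw [if_neg hret]
        have key := ih (done ++ [x]) (last.insert x (done.length : Int)) s
          (by intro c
              rw [PySem.Dict.getD_insert, lastOcc_snoc]
              split_ifs with h
              · rfl
              · exact hlast c)
          (by simp only [List.length_append, List.length_cons, List.length_nil]; omega)
          (by simp only [List.length_append, List.length_cons, List.length_nil]; omega)
          (by rw [List.drop_append_of_le_length (by omega)]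
              simpa using List.Nodup.concat hx hnod)
          (by intro t ht
              rw [List.append_assoc, List.singleton_append]
              exact hbad t ht)
        rw [List.append_assoc, List.singleton_append] at key
        simp only [List.length_append, List.length_cons, List.length_nil] at key
        push_cast at key
        exact key

theorem alt_eq_winScan (cs : List Char) :
    part1AltLoop cs 0 PySem.Dict.empty 0 = winScan cs 0 := by
  have := altLoop_eq cs [] PySem.Dict.empty 0
    (by intro c; simp [PySem.Dict.getD_empty, lastOcc])
    (by simp) (by simp) (by simp)
    (by intro t ht; omega)
  simpa using this

-- ===== VERDICT (by name: the statement is the Claim_ definition above) =====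
theorem part1_spec : Claim_equal_part1 := by
  intro data _
  unfold Spec_part1 part1 part1_alt
  rw [part1_eq_winScan, alt_eq_winScan]
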